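-- pv_equiv track=rewrite | github.com/d-keel/advent-of-code-2024 | 1/driver.py | calculateDifference
-- ===== SOURCE A (Python) =====
-- def calculateDifference(left: list[int], right: list[int]) -> tuple[int, int]:
--     total: int = 0
--     similarity: int = 0
--
--     myDict: dict[int, int] = {}
--
--     for i, v in enumerate(left):
--         myDict[v] = myDict.get(v, 0)
--         total += abs(v - right[i])
--
--     for v in right:
--         if v in myDict:
--             myDict[v] += 1
--
--     for k, v in myDict.items():
--         score: int = k * v
--         similarity += score
--
--     return total, similarity
-- ===== SOURCE B (Python) =====
-- def calculateDifference(left: list[int], right: list[int]) -> tuple[int, int]: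
--     total = 0
--     for i in range(len(left)):
--         total += abs(left[i] - right[i])
--     leftSet = set(left)
--     similarity = sum(v for v in right if v in leftSet)
--     return total, similarity
-- ===== Notes on version B (the rewrite author's own statement) =====
-- stated objective: simpler
-- what changed: Drops A's zero-initialised left-keyed dict and its count-then-multiply passes entirely: B computes the total with a plain index loop and the similarity as a single filtered sum over right (adding v whenever v is in set(left)), with no frequency counting and no key*count multiplication at all.
import Mathlib
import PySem

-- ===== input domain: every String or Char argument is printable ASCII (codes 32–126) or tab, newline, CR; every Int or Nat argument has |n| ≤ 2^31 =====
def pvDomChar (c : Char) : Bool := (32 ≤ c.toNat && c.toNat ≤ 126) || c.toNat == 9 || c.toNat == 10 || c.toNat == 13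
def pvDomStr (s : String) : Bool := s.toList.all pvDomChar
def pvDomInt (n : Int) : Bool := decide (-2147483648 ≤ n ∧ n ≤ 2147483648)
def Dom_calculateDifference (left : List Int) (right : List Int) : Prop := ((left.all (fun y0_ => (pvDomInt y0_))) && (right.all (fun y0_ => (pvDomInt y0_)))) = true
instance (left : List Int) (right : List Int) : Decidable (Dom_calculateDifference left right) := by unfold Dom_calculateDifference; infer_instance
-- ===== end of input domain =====

-- B drops A's left-keyed dict and its count/multiply passes: a plain index loop for the total
-- and a single filtered sum over right (add v whenever v ∈ set(left)) for the similarity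
-- (objective: simpler).

-- ===== PORT A =====
-- loop 1: total += abs(v - right[i]) and myDict[v] = myDict.get(v, 0), two accumulators in one pass.
-- right[i] is ported with pyGetD; Pre_ (left no longer than right) keeps every index in range,
-- exactly where Python's right[i] does not raise IndexError.
def calculateDifference (left : List Int) (right : List Int) : Int × Int :=
  let st := (PySem.List.enumerate left).foldl
    (fun (st : Int × PySem.Dict Int Int) iv =>
      (st.1 + |iv.2 - PySem.List.pyGetD right iv.1 0|,
       st.2.insert iv.2 (st.2.getD iv.2 0)))
    (0, PySem.Dict.empty)
  -- loop 2: for v in right: if v in myDict: myDict[v] += 1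
  let d := right.foldl (fun d v => if d.contains v then d.modify v 0 (· + 1) else d) st.2
  -- loop 3: for k, v in myDict.items(): similarity += k * v
  let similarity := d.items.foldl (fun acc kv => acc + kv.1 * kv.2) 0
  (st.1, similarity)

-- ===== PORT B =====
def calculateDifference_alt (left : List Int) (right : List Int) : Int × Int :=
  -- for i in range(len(left)): total += abs(left[i] - right[i])
  let total := (PySem.List.pyRange 0 left.length 1).foldl
    (fun acc i => acc + |PySem.List.pyGetD left i 0 - PySem.List.pyGetD right i 0|) 0
  let leftSet := PySem.Set.ofList left
  -- sum(v for v in right if v in leftSet): the sum of integers does not depend on set order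
  let similarity := (right.filter (fun v => PySem.Set.contains leftSet v)).sum
  (total, similarity)

-- ===== PRECONDITION & SPEC =====
-- Pre_ excludes exactly the inputs where right is shorter than left, on which A (and B) raise IndexError.
def Pre_calculateDifference (left : List Int) (right : List Int) : Prop :=
  left.length ≤ right.length
instance (left : List Int) (right : List Int) : Decidable (Pre_calculateDifference left right) := by
  unfold Pre_calculateDifference; infer_instance

def pvWitness_calculateDifference : List Int × List Int := ([3, 4, 2, 1, 3, 3], [4, 3, 5, 3, 9, 3])

def Spec_calculateDifference (left : List Int) (right : List Int) (out : Int × Int) : Prop := out = calculateDifference_alt left right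
instance (left : List Int) (right : List Int) (out : Int × Int) : Decidable (Spec_calculateDifference left right out) := by unfold Spec_calculateDifference; infer_instance

-- ===== CLAIM (what is proved, stated in full; the proofs are below) =====
def Claim_equal_calculateDifference : Prop := ∀ (left : List Int) (right : List Int), Dom_calculateDifference left right → Pre_calculateDifference left right → Spec_calculateDifference left right (calculateDifference left right)

-- ===== LEMMAS AND PROOFS =====

-- enumerate(xs, s) mapped through f is range-indexed access
lemma enumerate_map_eq (f : Int × Int → Int) (xs : List Int) : ∀ s : Int,
    (PySem.List.enumerate xs s).map f
      = (List.range xs.length).map (fun (k : Nat) => f ((s + k : Int), xs.getD k 0)) := by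
  induction xs with
  | nil => intro s; simp [PySem.List.enumerate]
  | cons x t ih =>
    intro s
    rw [PySem.List.enumerate_cons]
    simp only [List.map_cons, List.length_cons, List.range_succ_eq_map]
    rw [ih (s + 1)]
    refine List.cons_eq_cons.mpr ⟨by simp, ?_⟩
    rw [List.map_map]
    apply List.map_congr_left
    intro k _
    simp only [Function.comp_apply, List.getD_cons_succ]
    congr 2
    push_cast
    ring

lemma set_add_nodup (S : List Int) (v : Int) (h : S.Nodup) : (PySem.Set.add S v).Nodup := by
  simp only [PySem.Set.add]
  split
  · exact h
  · next hc =>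
    simp only [PySem.Set.contains] at hc
    simp only [List.contains_eq_mem, decide_eq_true_eq] at hc
    exact List.Nodup.append h (List.nodup_singleton v) (List.disjoint_singleton.mpr hc)

lemma dict_step (S : List Int) (v : Int) (h : S.Nodup) :
    (PySem.Dict.mk (S.map (fun k => (k, (0 : Int))))).insert v
        ((PySem.Dict.mk (S.map (fun k => (k, (0 : Int))))).getD v 0)
      = PySem.Dict.mk ((PySem.Set.add S v).map (fun k => (k, (0 : Int)))) := by
  have hkeys : (PySem.Dict.mk (S.map (fun k => (k, (0 : Int))))).keys = S := by
    simp [PySem.Dict.keys_mk, Function.comp_def]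
  have hc : (PySem.Dict.mk (S.map (fun k => (k, (0 : Int))))).contains v = S.contains v := by
    simp only [PySem.Dict.contains_mk, List.any_map, Function.comp_def]
    rw [List.any_beq', List.contains_eq_mem]
  have hg : (PySem.Dict.mk (S.map (fun k => (k, (0 : Int))))).getD v 0 = 0 := by
    by_cases hv : v ∈ S
    · exact PySem.Dict.getD_of_mem_items _ (by simp; exact hv) (by rw [hkeys]; exact h) 0
    · apply PySem.Dict.getD_of_not_contains
      rw [hc]; simpa using hv
  rw [hg]
  by_cases hv : v ∈ S
  · have hct : (PySem.Dict.mk (S.map (fun k => (k, (0 : Int))))).contains v = true := by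
      rw [hc]; simpa using hv
    apply PySem.Dict.ext
    rw [PySem.Dict.items_insert_of_contains _ _ hct]
    have : PySem.Set.add S v = S := by
      simp [PySem.Set.add, PySem.Set.contains, List.contains_eq_mem, hv]
    rw [this]
    show List.map _ (S.map (fun k => (k, (0:Int)))) = _
    rw [List.map_map]
    apply List.map_congr_left
    intro k _
    simp only [Function.comp_apply]
    split
    · next he => simp at he; simp [he]
    · rfl
  · have hct : (PySem.Dict.mk (S.map (fun k => (k, (0 : Int))))).contains v = false := by
      rw [hc]; simpa using hv
    apply PySem.Dict.ext
    rw [PySem.Dict.items_insert_of_not_contains _ _ hct]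
    have : PySem.Set.add S v = S ++ [v] := by
      simp [PySem.Set.add, PySem.Set.contains, List.contains_eq_mem, hv]
    rw [this]
    simp

lemma dictA_eq (l : List Int) : ∀ S : List Int, S.Nodup →
    (l.foldl (fun d v => d.insert v (d.getD v 0)) (PySem.Dict.mk (S.map (fun k => (k, (0 : Int))))))
      = PySem.Dict.mk ((PySem.Set.update S l).map (fun k => (k, (0 : Int)))) := by
  induction l with
  | nil => intro S h; simp [PySem.Set.update]
  | cons v t ih =>
    intro S h
    simp only [List.foldl_cons]
    rw [dict_step S v h, ih _ (set_add_nodup S v h)]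
    rfl

lemma loop2_getD (r : List Int) : ∀ (d : PySem.Dict Int Int) (k : Int),
    (r.foldl (fun d v => if d.contains v then d.modify v 0 (· + 1) else d) d).getD k 0
      = d.getD k 0 + (if d.contains k then (r.count k : Int) else 0) := by
  induction r with
  | nil => intro d k; simp
  | cons v t ih =>
    intro d k
    simp only [List.foldl_cons]
    by_cases hv : d.contains v = true
    · rw [if_pos hv, ih]
      have hcon : ((d.modify v 0 (· + 1)).contains k) = d.contains k := by
        rw [PySem.Dict.contains_modify]
        by_cases hk : k = v
        · subst hk; simp [hv]
        · simp [hk]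
      rw [hcon, PySem.Dict.getD_modify]
      by_cases hk : k = v
      · subst hk
        rw [if_pos rfl]
        simp [hv]
        ring
      · rw [if_neg hk]
        have hvk : ¬ v = k := fun h => hk h.symm
        simp [hvk]
    · rw [if_neg (by simpa using hv), ih]
      by_cases hk : k = v
      · subst hk; simp [hv]
      · have hvk : ¬ v = k := fun h => hk h.symm
        simp [hvk]

lemma loop2_keys (r : List Int) : ∀ d : PySem.Dict Int Int,
    (r.foldl (fun d v => if d.contains v then d.modify v 0 (· + 1) else d) d).keys = d.keys := by
  induction r with
  | nil => intro d; simp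
  | cons v t ih =>
    intro d
    simp only [List.foldl_cons]
    by_cases hv : d.contains v = true
    · rw [if_pos hv, ih]
      rw [PySem.Dict.keys_modify]
      exact PySem.Dict.keys_insert_of_contains _ _ hv
    · rw [if_neg (by simpa using hv), ih]

-- over a duplicate-free S, summing 'if k = v then k else 0' picks out v (or 0)
lemma sum_pick (v : Int) : ∀ S : List Int, S.Nodup →
    (S.map (fun k => if k = v then v else 0)).sum = if v ∈ S then v else 0 := by
  intro S
  induction S with
  | nil => intro _; simp
  | cons x t ih =>
    intro h
    simp only [List.map_cons, List.sum_cons, List.mem_cons]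
    rcases List.nodup_cons.mp h with ⟨hx, ht⟩
    rw [ih ht]
    by_cases hxv : x = v
    · subst hxv
      simp [hx]
    · have : ¬ v = x := fun h' => hxv h'.symm
      simp [hxv, this]

-- the distinct-key count-multiply sum equals the filtered sum over right
lemma sim_flip (S : List Int) (hS : S.Nodup) : ∀ r : List Int,
    (S.map (fun k => k * (r.count k : Int))).sum
      = (r.filter (fun v => S.contains v)).sum := by
  intro r
  induction r with
  | nil => simp
  | cons v t ih =>
    have hsplit : (S.map (fun k => k * ((v :: t).count k : Int))).sum
        = (S.map (fun k => k * (t.count k : Int))).sum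
          + (S.map (fun k => if k = v then v else 0)).sum := by
      rw [← List.sum_map_add]
      apply congrArg List.sum
      apply List.map_congr_left
      intro k _
      by_cases hk : k = v
      · subst hk
        simp [List.count_cons]
        push_cast
        ring
      · have hvk : ¬ v = k := fun h' => hk h'.symm
        simp [List.count_cons, hk, hvk]
    rw [hsplit, ih, sum_pick v S hS]
    by_cases hv : v ∈ S
    · have : S.contains v = true := by rw [List.contains_eq_mem]; simpa using hv
      simp [List.filter_cons, PySem.Set.contains, this, hv]
      ring
    · have : S.contains v = false := by rw [List.contains_eq_mem]; simpa using hv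
      simp [List.filter_cons, PySem.Set.contains, this, hv]

-- ===== VERDICT (by name: the statement is the Claim_ definition above) =====
theorem calculateDifference_spec : Claim_equal_calculateDifference := by
  intro left right _hdom hpre
  unfold Spec_calculateDifference
  simp only [calculateDifference, calculateDifference_alt]
  rw [PySem.List.foldl_prod_mk
      (f := fun t (iv : Int × Int) => t + |iv.2 - PySem.List.pyGetD right iv.1 0|)
      (g := fun (d : PySem.Dict Int Int) (iv : Int × Int) => d.insert iv.2 (d.getD iv.2 0))]
  have hS : PySem.Set.update ([] : PySem.Set Int) left = PySem.Set.ofList left := by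
    rw [PySem.Set.ofList_eq_foldl]; rfl
  have hnd : (PySem.Set.ofList left).Nodup := PySem.Set.nodup_ofList left
  -- the dict after loop 1
  have hd1 : (PySem.List.enumerate left).foldl
        (fun (d : PySem.Dict Int Int) (iv : Int × Int) => d.insert iv.2 (d.getD iv.2 0)) PySem.Dict.empty
      = PySem.Dict.mk ((PySem.Set.ofList left).map (fun k => (k, (0 : Int)))) := by
    have hsnd : (PySem.List.enumerate left).foldl
          (fun (d : PySem.Dict Int Int) (iv : Int × Int) => d.insert iv.2 (d.getD iv.2 0)) PySem.Dict.empty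
        = left.foldl (fun d v => d.insert v (d.getD v 0)) PySem.Dict.empty := by
      conv_rhs => rw [← PySem.List.map_snd_enumerate left 0]
      rw [List.foldl_map]
    rw [hsnd]
    have := dictA_eq left [] (by simp)
    simpa [hS] using this
  rw [hd1]
  -- keys after loop 2
  have hkeys1 : (PySem.Dict.mk ((PySem.Set.ofList left).map (fun k => (k, (0 : Int))))).keys
      = PySem.Set.ofList left := by
    simp [PySem.Dict.keys_mk, Function.comp_def]
  have hkeys : (right.foldl (fun d v => if d.contains v then d.modify v 0 (· + 1) else d)
        (PySem.Dict.mk ((PySem.Set.ofList left).map (fun k => (k, (0 : Int)))))).keys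
      = PySem.Set.ofList left := by
    rw [loop2_keys, hkeys1]
  -- items after loop 2
  have hitems : (right.foldl (fun d v => if d.contains v then d.modify v 0 (· + 1) else d)
        (PySem.Dict.mk ((PySem.Set.ofList left).map (fun k => (k, (0 : Int)))))).items
      = (PySem.Set.ofList left).map (fun k => (k, (right.count k : Int))) := by
    rw [PySem.Dict.items_eq_map_keys _ (by rw [hkeys]; exact hnd) 0, hkeys]
    apply List.map_congr_left
    intro k hk
    rw [loop2_getD]
    have hc : (PySem.Dict.mk ((PySem.Set.ofList left).map (fun j => (j, (0 : Int))))).contains k = true := by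
      simp only [PySem.Dict.contains_mk, List.any_map, Function.comp_def]
      rw [List.any_beq', List.contains_eq_mem]
      simpa using (PySem.Set.mem_ofList left k).mp hk
    have hg : (PySem.Dict.mk ((PySem.Set.ofList left).map (fun j => (j, (0 : Int))))).getD k 0 = 0 :=
      PySem.Dict.getD_of_mem_items _ (by simp; exact (PySem.Set.mem_ofList left k).mp hk) (by rw [hkeys1]; exact hnd) 0
    rw [hg, hc, if_pos rfl]
    simp
  rw [hitems]
  refine Prod.ext ?_ ?_
  · -- totals
    show (PySem.List.enumerate left).foldl _ 0 = _
    rw [PySem.List.foldl_add, PySem.List.foldl_add]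
    rw [enumerate_map_eq (fun iv => |iv.2 - PySem.List.pyGetD right iv.1 0|) left 0]
    rw [PySem.List.pyRange_one, List.map_map]
    simp only [Int.sub_zero, Int.toNat_natCast]
    simp only [Int.zero_add]
    apply congrArg List.sum
    apply List.map_congr_left
    intro k hkmem
    simp only [Function.comp_apply]
    simp [PySem.List.pyGetD_natCast]
  · -- similarity
    show List.foldl _ 0 (List.map _ _) = _
    rw [PySem.List.foldl_add, List.map_map]
    simp only [Int.zero_add]
    have := sim_flip (PySem.Set.ofList left) hnd right
    simp only [PySem.Set.contains] at this
    simp only [PySem.Set.contains]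
    rw [← this]
    apply congrArg List.sum
    apply List.map_congr_left
    intro k _
    simp
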